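-- pv_equiv track=rewrite | github.com/VariantEffect/MaveDB | main/utils/query_parsing.py | chain_until_next_quotes
-- ===== SOURCE A (Python) =====
-- def chain_until_next_quotes(items, sep=','):
--     """
--     Looks at a list of strings that have been split by `sep`
--     and tries to collect items in the list that start with '"' and end
--     with '"' into a single string.
--
--     Parameters
--     ----------
--     items : `list`
--         List of strings
--     sep : `str`
--         Separator used to split the list of strings.
--
--     Returns
--     -------
--     `tuple`
--         The resulting joined string and the number of items joined.
--     """
--     i = 1
--     string = items[0]
--     state = 'open'
--
--     if not string.startswith('"') and not string.startswith("'"):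
--         return string.strip(), i
--     else:
--         while i < len(items):
--             item = items[i]
--             string = '{}{}{}'.format(string, sep, item)
--             i += 1
--             if string.startswith('"') and item.endswith('"'):
--                 break
--             if string.startswith("'") and item.endswith("'"):
--                 break
--         return string.strip()[1:-1], i
-- ===== SOURCE B (Python) =====
-- def chain_until_next_quotes(items, sep=','):
--     first = items[0]
--     if not first.startswith('"') and not first.startswith("'"):
--         return first.strip(), 1
--     q = '"' if first.startswith('"') else "'"
--     try:
--         cnt = 2 + next(k for k, it in enumerate(items[1:]) if it.endswith(q))
--     except StopIteration:
--         cnt = len(items)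
--     joined = sep.join(items[:cnt])
--     return joined.strip()[1:-1], cnt
-- ===== Notes on version B (the rewrite author's own statement) =====
-- stated objective: alternative
-- what changed: B splits the work into a search phase (find the first later item ending with the opening quote, via next over enumerate) and a single sep.join of the prefix, instead of A's while loop that re-formats the accumulator string at every step.
-- outside the precondition, e.g. on chain_until_next_quotes([], ','): A raises IndexError, B raises IndexError
import Mathlib
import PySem

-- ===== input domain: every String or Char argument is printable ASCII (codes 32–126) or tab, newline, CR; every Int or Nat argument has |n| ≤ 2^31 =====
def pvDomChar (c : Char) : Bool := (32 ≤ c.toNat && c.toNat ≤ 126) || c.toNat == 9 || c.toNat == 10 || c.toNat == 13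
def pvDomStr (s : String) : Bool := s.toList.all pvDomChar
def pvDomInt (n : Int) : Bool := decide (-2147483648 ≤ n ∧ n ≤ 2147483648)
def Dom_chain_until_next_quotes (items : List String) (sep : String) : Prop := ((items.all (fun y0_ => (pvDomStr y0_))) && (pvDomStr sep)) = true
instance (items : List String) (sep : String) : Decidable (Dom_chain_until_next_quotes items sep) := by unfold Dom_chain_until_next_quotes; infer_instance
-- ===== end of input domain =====

-- B separates finding the closing-quote boundary (first later item ending with the opening
-- quote) from building the string (one sep.join of the prefix), instead of A's while loop
-- that re-concatenates the accumulator at every step; objective: alternative decomposition.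

-- ===== PORT A =====
-- the while loop of A: state = (string, i), scanning items[i:] one item at a time
def chainA_loop (sep : List Char) : List String → List Char → Int → List Char × Int
  | [], string, i => (string, i)
  | item :: rest, string, i =>
    let string' := string ++ sep ++ item.toList
    let i' := i + 1
    if PySem.Chars.startswith string' ['"'] && PySem.Chars.endswith item.toList ['"'] then
      (string', i')
    else if PySem.Chars.startswith string' ['\''] && PySem.Chars.endswith item.toList ['\''] then
      (string', i')
    else chainA_loop sep rest string' i'

def chain_until_next_quotes (items : List String) (sep : String) : String × Int :=
  match items with
  | [] => ("", 1)   -- items[0] raises IndexError in Python; excluded by Pre_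
  | first :: rest =>
    let string := first.toList
    if !(PySem.Chars.startswith string ['"']) && !(PySem.Chars.startswith string ['\'']) then
      (String.ofList (PySem.Chars.strip string), 1)
    else
      let r := chainA_loop sep.toList rest string 1
      (String.ofList (PySem.List.slice (PySem.Chars.strip r.1) (some 1) (some (-1))), r.2)

-- ===== PORT B =====
def chain_until_next_quotes_alt (items : List String) (sep : String) : String × Int :=
  match items with
  | [] => ("", 1)   -- items[0] raises IndexError in Python; excluded by Pre_
  | first :: rest =>
    if !(PySem.Chars.startswith first.toList ['"']) && !(PySem.Chars.startswith first.toList ['\'']) then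
      (String.ofList (PySem.Chars.strip first.toList), 1)
    else
      let q : Char := if PySem.Chars.startswith first.toList ['"'] then '"' else '\''
      let cnt : Nat :=
        match rest.findIdx? (fun it => PySem.Chars.endswith it.toList [q]) with
        | some k => k + 2
        | none => rest.length + 1
      let joined := PySem.Str.join sep ((first :: rest).take cnt)
      (String.ofList (PySem.List.slice (PySem.Chars.strip joined.toList) (some 1) (some (-1))), (Int.ofNat cnt))

-- ===== PRECONDITION & SPEC =====
-- Pre_ excludes only the empty list, on which Python's items[0] raises IndexError.
def Pre_chain_until_next_quotes (items : List String) (sep : String) : Prop := items ≠ []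
instance (items : List String) (sep : String) : Decidable (Pre_chain_until_next_quotes items sep) := by unfold Pre_chain_until_next_quotes; infer_instance
def pvWitness_chain_until_next_quotes : List String × String := (["\"a", "b\"", "c"], ",")

def Spec_chain_until_next_quotes (items : List String) (sep : String) (out : String × Int) : Prop := out = chain_until_next_quotes_alt items sep
instance (items : List String) (sep : String) (out : String × Int) : Decidable (Spec_chain_until_next_quotes items sep out) := by unfold Spec_chain_until_next_quotes; infer_instance

-- ===== CLAIM (what is proved, stated in full; the proofs are below) =====
def Claim_equal_chain_until_next_quotes : Prop := ∀ (items : List String) (sep : String), Dom_chain_until_next_quotes items sep → Pre_chain_until_next_quotes items sep → Spec_chain_until_next_quotes items sep (chain_until_next_quotes items sep)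

-- ===== LEMMAS AND PROOFS =====

-- B's boundary count, as a named helper for the proofs
def bCnt (rest : List String) (q : Char) : Nat :=
  match rest.findIdx? (fun it => PySem.Chars.endswith it.toList [q]) with
  | some k => k + 2
  | none => rest.length + 1

-- join of a nonempty list is head ++ (sep ++ ·) flat-mapped over the tail
theorem join_cons_eq_flatMap (sep a : List Char) (l : List (List Char)) :
    PySem.Chars.join sep (a :: l) = a ++ l.flatMap (fun x => sep ++ x) := by
  induction l generalizing a with
  | nil => simp [PySem.Chars.join_singleton]
  | cons b t ih =>
    rw [PySem.Chars.join_cons_cons, ih b]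
    simp

-- A's loop, started on a string whose first char is the opening quote q, stops right
-- after the first item ending with q (or at the end of the list) and has accumulated
-- exactly the (sep ++ item)-concatenation of the consumed items.
theorem chainA_loop_eq (sep : List Char) (q : Char) (hq : q = '"' ∨ q = '\'')
    (rest : List String) : ∀ (t : List Char) (i : Int),
    chainA_loop sep rest (q :: t) i =
      match rest.findIdx? (fun it => PySem.Chars.endswith it.toList [q]) with
      | some k => (q :: t ++ (rest.take (k+1)).flatMap (fun it => sep ++ it.toList), i + (k+1))
      | none => (q :: t ++ rest.flatMap (fun it => sep ++ it.toList), i + rest.length) := by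
  induction rest with
  | nil => intro t i; simp [chainA_loop]
  | cons item rest' ih =>
    intro t i
    have hsw : ∀ (c : Char) (u : List Char),
        PySem.Chars.startswith (q :: u) [c] = decide (c = q) := by
      intro c u
      by_cases h : c = q
      · subst h; simp [PySem.Chars.startswith_iff, List.cons_prefix_cons]
      · rw [decide_eq_false h, ← Bool.not_eq_true, PySem.Chars.startswith_iff]
        simp [List.cons_prefix_cons, h]
    have hstep : (q :: t) ++ sep ++ item.toList = q :: (t ++ sep ++ item.toList) := by simp
    have key : chainA_loop sep (item :: rest') (q :: t) i =
        (if PySem.Chars.endswith item.toList [q] = true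
         then ((q :: t) ++ sep ++ item.toList, i + 1)
         else chainA_loop sep rest' ((q :: t) ++ sep ++ item.toList) (i + 1)) := by
      show (if _ then _ else _) = _
      by_cases hend : PySem.Chars.endswith item.toList [q] = true <;>
        rcases hq with hq | hq <;> subst hq <;>
          rw [hstep, hsw, hsw] <;> simp_all
    rw [key, List.findIdx?_cons]
    by_cases hend : PySem.Chars.endswith item.toList [q] = true
    · simp [hend]
    · simp only [hend, if_false, Bool.false_eq_true]
      rw [hstep, ih (t ++ sep ++ item.toList) (i + 1)]
      cases hfi : rest'.findIdx? (fun it => PySem.Chars.endswith it.toList [q]) with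
      | some k =>
        simp only [hfi, Option.map_some]
        refine Prod.ext ?_ ?_
        · simp [List.take_succ_cons]
        · show i + 1 + ((k : Int) + 1) = i + (((k : Int) + 1) + 1)
          ring
      | none =>
        simp only [hfi, Option.map_none]
        refine Prod.ext ?_ ?_
        · simp
        · show i + 1 + ((rest'.length : Int)) = i + (((item :: rest').length : Int))
          simp [List.length_cons]; ring

-- the quoted branch: A's loop result is exactly B's join of the first bCnt items
theorem quote_branch (first : String) (rest : List String) (sep : String) (q : Char)
    (hq : q = '"' ∨ q = '\'')
    (hqsw : PySem.Chars.startswith first.toList [q] = true) :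
    chainA_loop sep.toList rest first.toList 1 =
      ((PySem.Str.join sep ((first :: rest).take (bCnt rest q))).toList, Int.ofNat (bCnt rest q)) := by
  obtain ⟨u, hu⟩ := (PySem.Chars.startswith_iff _ _).mp hqsw
  have hfirst : first.toList = q :: u := hu.symm
  rw [hfirst, chainA_loop_eq sep.toList q hq rest u 1]
  unfold bCnt
  cases hfi : rest.findIdx? (fun it => PySem.Chars.endswith it.toList [q]) with
  | some k =>
    refine Prod.ext ?_ ?_
    · rw [PySem.Str.toList_join]
      have htake : (first :: rest).take (k + 2) = first :: rest.take (k + 1) := rfl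
      rw [htake, List.map_cons, join_cons_eq_flatMap, hfirst]
      simp [← List.map_take, List.flatMap_map]
    · show (1 : Int) + ((k : Int) + 1) = Int.ofNat (k + 2)
      simp only [Int.ofNat_eq_natCast]; push_cast; ring
  | none =>
    refine Prod.ext ?_ ?_
    · rw [PySem.Str.toList_join]
      have htake : (first :: rest).take (rest.length + 1) = first :: rest := by
        simp [List.take_succ_cons]
      rw [htake, List.map_cons, join_cons_eq_flatMap, hfirst]
      simp [List.flatMap_map]
    · show (1 : Int) + (rest.length : Int) = Int.ofNat (rest.length + 1)
      simp only [Int.ofNat_eq_natCast]; push_cast; ring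

-- ===== VERDICT (by name: the statement is the Claim_ definition above) =====
theorem chain_until_next_quotes_spec : Claim_equal_chain_until_next_quotes := by
  intro items sep _ hpre
  unfold Spec_chain_until_next_quotes
  match items with
  | [] => exact absurd rfl hpre
  | first :: rest =>
    by_cases hc : (!(PySem.Chars.startswith first.toList ['"']) && !(PySem.Chars.startswith first.toList ['\''])) = true
    · simp [chain_until_next_quotes, chain_until_next_quotes_alt, hc]
    · have hc' : (!(PySem.Chars.startswith first.toList ['"']) && !(PySem.Chars.startswith first.toList ['\''])) = false := by
        simpa using hc
      cases h1 : PySem.Chars.startswith first.toList ['"'] with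
      | true =>
        have hk := quote_branch first rest sep '"' (Or.inl rfl) h1
        simp only [chain_until_next_quotes, chain_until_next_quotes_alt, hc',
          Bool.false_eq_true, if_false, h1, if_true, hk, bCnt]
      | false =>
        have h2 : PySem.Chars.startswith first.toList ['\''] = true := by
          cases h : PySem.Chars.startswith first.toList ['\''] with
          | true => rfl
          | false => exact absurd (by simp [h1, h]) hc
        have hk := quote_branch first rest sep '\'' (Or.inr rfl) h2
        simp only [chain_until_next_quotes, chain_until_next_quotes_alt, hc',
          Bool.false_eq_true, if_false, h1, hk, bCnt]
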